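-- pv_equiv track=rewrite | github.com/Norges-Bank-CBDC-Lab/cbdc-tokenization-sandbox | scripts/verification/check-third-party-licenses.py | assert_rows_match
-- ===== SOURCE A (Python) =====
-- def assert_rows_match(
--     section_name: str,
--     actual_rows: dict[str, dict[str, str]],
--     expected_rows: dict[str, dict[str, str]],
--     fields: tuple[str, ...],
-- ) -> list[str]:
--     errors: list[str] = []
--
--     actual_packages = set(actual_rows)
--     expected_packages = set(expected_rows)
--
--     missing = sorted(expected_packages - actual_packages)
--     extra = sorted(actual_packages - expected_packages)
--
--     for package_name in missing:
--         errors.append(f"{section_name}: missing row for {package_name}")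
--     for package_name in extra:
--         errors.append(f"{section_name}: unexpected row for {package_name}")
--
--     for package_name in sorted(actual_packages & expected_packages):
--         for field_name in fields:
--             actual_value = actual_rows[package_name].get(field_name, "").strip()
--             expected_value = expected_rows[package_name][field_name]
--             if actual_value != expected_value:
--                 errors.append(
--                     f"{section_name}: {package_name} {field_name.lower()} "
--                     f"expected {expected_value}, found {actual_value or '<blank>'}"
--                 )
--
--     return errors
-- ===== SOURCE B (Python) =====
-- def assert_rows_match(
--     section_name: str,
--     actual_rows: dict[str, dict[str, str]],
--     expected_rows: dict[str, dict[str, str]],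
--     fields: tuple[str, ...],
-- ) -> list[str]:
--     missing_errs: list[str] = []
--     extra_errs: list[str] = []
--     field_errs: list[str] = []
--
--     for package_name in sorted(set(actual_rows) | set(expected_rows)):
--         if package_name not in actual_rows:
--             missing_errs.append(f"{section_name}: missing row for {package_name}")
--         elif package_name not in expected_rows:
--             extra_errs.append(f"{section_name}: unexpected row for {package_name}")
--         else:
--             actual_row = actual_rows[package_name]
--             expected_row = expected_rows[package_name]
--             for field_name in fields:
--                 actual_value = actual_row.get(field_name, "").strip()
--                 expected_value = expected_row[field_name]
--                 if actual_value != expected_value: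
--                     field_errs.append(
--                         f"{section_name}: {package_name} {field_name.lower()} "
--                         f"expected {expected_value}, found {actual_value or '<blank>'}"
--                     )
--
--     return missing_errs + extra_errs + field_errs
-- ===== Notes on version B (the rewrite author's own statement) =====
-- stated objective: alternative
-- what changed: Replaces the three separate loops over sorted set-differences/intersection by a single pass over the sorted union of all package keys that classifies each package by membership into one of three accumulator lists, concatenated at the end to reproduce the grouped order.
import Mathlib
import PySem

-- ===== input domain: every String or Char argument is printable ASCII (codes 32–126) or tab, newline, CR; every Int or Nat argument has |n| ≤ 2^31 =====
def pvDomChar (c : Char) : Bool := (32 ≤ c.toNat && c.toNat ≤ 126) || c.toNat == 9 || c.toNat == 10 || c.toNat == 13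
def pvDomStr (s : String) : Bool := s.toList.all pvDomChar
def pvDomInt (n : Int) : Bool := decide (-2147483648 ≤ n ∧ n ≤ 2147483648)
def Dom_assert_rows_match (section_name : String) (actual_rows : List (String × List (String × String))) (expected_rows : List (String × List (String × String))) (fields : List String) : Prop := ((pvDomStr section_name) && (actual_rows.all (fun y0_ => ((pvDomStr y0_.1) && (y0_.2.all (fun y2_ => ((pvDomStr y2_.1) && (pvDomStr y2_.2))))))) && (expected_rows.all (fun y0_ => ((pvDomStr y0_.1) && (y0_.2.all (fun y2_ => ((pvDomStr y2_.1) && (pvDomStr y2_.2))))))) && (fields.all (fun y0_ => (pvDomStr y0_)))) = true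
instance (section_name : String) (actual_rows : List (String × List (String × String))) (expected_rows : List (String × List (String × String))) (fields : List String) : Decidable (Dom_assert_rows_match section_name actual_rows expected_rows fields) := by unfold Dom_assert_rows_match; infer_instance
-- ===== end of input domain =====

-- B replaces A's three loops over sorted set-differences/intersection by one pass over the
-- sorted union of all package keys, classifying each into one of three accumulator lists
-- (missing/extra/field errors) and concatenating them; same cost, different decomposition.

-- ===== PORT A =====
-- expected_rows[package][field] raises KeyError when the field is absent; under
-- Pre_assert_rows_match the key is present, so the total 'getD … ""' below is exact there.
def assert_rows_match (section_name : String) (actual_rows : List (String × List (String × String))) (expected_rows : List (String × List (String × String))) (fields : List String) : List String :=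
  let actual_packages : PySem.Set String := PySem.Set.ofList (actual_rows.map (·.1))
  let expected_packages : PySem.Set String := PySem.Set.ofList (expected_rows.map (·.1))
  let missing := PySem.List.sorted (PySem.Set.diff expected_packages actual_packages) (fun x => x) false
  let extra := PySem.List.sorted (PySem.Set.diff actual_packages expected_packages) (fun x => x) false
  let errors : List String := missing.foldl (fun errs p => errs ++ [section_name ++ ": missing row for " ++ p]) []
  let errors := extra.foldl (fun errs p => errs ++ [section_name ++ ": unexpected row for " ++ p]) errors
  (PySem.List.sorted (PySem.Set.inter actual_packages expected_packages) (fun x => x) false).foldl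
    (fun errs p =>
      fields.foldl (fun errs f =>
        let actual_value := PySem.Str.strip ((PySem.Dict.mk ((PySem.Dict.mk actual_rows).getD p [])).getD f "")
        let expected_value := (PySem.Dict.mk ((PySem.Dict.mk expected_rows).getD p [])).getD f ""
        if actual_value ≠ expected_value then
          errs ++ [section_name ++ ": " ++ p ++ " " ++ PySem.Str.lower f ++ " expected " ++ expected_value ++ ", found " ++ (if actual_value = "" then "<blank>" else actual_value)]
        else errs) errs)
    errors

-- ===== PORT B =====
def assert_rows_match_alt (section_name : String) (actual_rows : List (String × List (String × String))) (expected_rows : List (String × List (String × String))) (fields : List String) : List String :=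
  let act_keys := actual_rows.map (·.1)
  let exp_keys := expected_rows.map (·.1)
  let packages := PySem.List.sorted (PySem.Set.union (PySem.Set.ofList act_keys) (PySem.Set.ofList exp_keys)) (fun x => x) false
  let res := packages.foldl
    (fun (acc : List String × List String × List String) p =>
      if !(act_keys.contains p) then
        (acc.1 ++ [section_name ++ ": missing row for " ++ p], acc.2.1, acc.2.2)
      else if !(exp_keys.contains p) then
        (acc.1, acc.2.1 ++ [section_name ++ ": unexpected row for " ++ p], acc.2.2)
      else
        let actual_row := (PySem.Dict.mk actual_rows).getD p []
        let expected_row := (PySem.Dict.mk expected_rows).getD p []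
        (acc.1, acc.2.1,
          fields.foldl (fun fe f =>
            let actual_value := PySem.Str.strip ((PySem.Dict.mk actual_row).getD f "")
            let expected_value := (PySem.Dict.mk expected_row).getD f ""
            if actual_value ≠ expected_value then
              fe ++ [section_name ++ ": " ++ p ++ " " ++ PySem.Str.lower f ++ " expected " ++ expected_value ++ ", found " ++ (if actual_value = "" then "<blank>" else actual_value)]
            else fe) acc.2.2))
    ([], [], [])
  res.1 ++ res.2.1 ++ res.2.2

-- ===== PRECONDITION & SPEC =====
-- Pre_ excludes exactly the inputs where Python A (and B alike) raises KeyError: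
-- a package present in both dicts whose expected row lacks one of the fields.
def Pre_assert_rows_match (section_name : String) (actual_rows : List (String × List (String × String))) (expected_rows : List (String × List (String × String))) (fields : List String) : Prop :=
  ∀ p ∈ actual_rows.map (·.1), p ∈ expected_rows.map (·.1) →
    ∀ f ∈ fields, f ∈ (((PySem.Dict.mk expected_rows).getD p []).map (·.1))
instance (section_name : String) (actual_rows : List (String × List (String × String))) (expected_rows : List (String × List (String × String))) (fields : List String) : Decidable (Pre_assert_rows_match section_name actual_rows expected_rows fields) := by unfold Pre_assert_rows_match; infer_instance
def pvWitness_assert_rows_match : String × (List (String × List (String × String))) × (List (String × List (String × String))) × List String :=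
  ("licenses", [("pkga", [("License", " MIT ")]), ("pkgb", [])], [("pkga", [("License", "MIT")]), ("pkgc", [("License", "BSD")])], ["License"])
def Spec_assert_rows_match (section_name : String) (actual_rows : List (String × List (String × String))) (expected_rows : List (String × List (String × String))) (fields : List String) (out : List String) : Prop := out = assert_rows_match_alt section_name actual_rows expected_rows fields
instance (section_name : String) (actual_rows : List (String × List (String × String))) (expected_rows : List (String × List (String × String))) (fields : List String) (out : List String) : Decidable (Spec_assert_rows_match section_name actual_rows expected_rows fields out) := by unfold Spec_assert_rows_match; infer_instance

-- ===== CLAIM (what is proved, stated in full; the proofs are below) =====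
def Claim_equal_assert_rows_match : Prop := ∀ (section_name : String) (actual_rows : List (String × List (String × String))) (expected_rows : List (String × List (String × String))) (fields : List String), Dom_assert_rows_match section_name actual_rows expected_rows fields → Pre_assert_rows_match section_name actual_rows expected_rows fields → Spec_assert_rows_match section_name actual_rows expected_rows fields (assert_rows_match section_name actual_rows expected_rows fields)

-- ===== LEMMAS AND PROOFS =====

-- B's single classifying pass, characterised: three filtered projections of the traversed list.
theorem tripleFold (c1 c2 : String → Bool) (f1 f2 : String → String) (h : String → List String)
    (l : List String) (acc : List String × List String × List String) :
    l.foldl (fun acc p =>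
      if c1 p then (acc.1 ++ [f1 p], acc.2.1, acc.2.2)
      else if c2 p then (acc.1, acc.2.1 ++ [f2 p], acc.2.2)
      else (acc.1, acc.2.1, acc.2.2 ++ h p)) acc
    = (acc.1 ++ (l.filter c1).map f1,
       acc.2.1 ++ (l.filter (fun p => !c1 p && c2 p)).map f2,
       acc.2.2 ++ (l.filter (fun p => !c1 p && !c2 p)).flatMap h) := by
  induction l generalizing acc with
  | nil => simp
  | cons x xs ih =>
    cases hc1 : c1 x <;> cases hc2 : c2 x <;>
      simp [List.foldl_cons, hc1, hc2, ih, List.append_assoc]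

theorem nodup_sorted_union (AK EK : List String) :
    (PySem.List.sorted (PySem.Set.union (PySem.Set.ofList AK) (PySem.Set.ofList EK)) (fun x => x) false).Nodup :=
  (PySem.List.sorted_perm _ _ _).symm.nodup
    (PySem.Set.nodup_union (PySem.Set.ofList AK) (PySem.Set.ofList EK) (PySem.Set.nodup_ofList AK))

theorem mem_sorted_union (AK EK : List String) (x : String) :
    x ∈ PySem.List.sorted (PySem.Set.union (PySem.Set.ofList AK) (PySem.Set.ofList EK)) (fun x => x) false
      ↔ x ∈ AK ∨ x ∈ EK := by
  rw [PySem.List.mem_sorted, PySem.Set.mem_union, PySem.Set.mem_ofList, PySem.Set.mem_ofList]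

theorem pairwise_lt_sorted_union (AK EK : List String) :
    (PySem.List.sorted (PySem.Set.union (PySem.Set.ofList AK) (PySem.Set.ofList EK)) (fun x => x) false).Pairwise (· < ·) := by
  have hle := PySem.List.sorted_pairwise (PySem.Set.union (PySem.Set.ofList AK) (PySem.Set.ofList EK)) (fun x => x)
  have hne : (PySem.List.sorted (PySem.Set.union (PySem.Set.ofList AK) (PySem.Set.ofList EK)) (fun x => x) false).Pairwise (· ≠ ·) :=
    nodup_sorted_union AK EK
  exact (hle.and hne).imp (fun h => lt_of_le_of_ne h.1 h.2)

-- any set whose members are exactly the c-filtered union sorts to the filtered sorted union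
theorem sorted_eq_filter_sorted_union (AK EK : List String) (c : String → Bool)
    (S : List String) (hS : S.Nodup)
    (hmem : ∀ x, x ∈ S ↔ (x ∈ AK ∨ x ∈ EK) ∧ c x = true) :
    PySem.List.sorted S (fun x => x) false
      = (PySem.List.sorted (PySem.Set.union (PySem.Set.ofList AK) (PySem.Set.ofList EK)) (fun x => x) false).filter c := by
  apply PySem.List.sorted_eq_of_perm_of_pairwise_lt
  · refine (List.perm_ext_iff_of_nodup ((nodup_sorted_union AK EK).filter c) hS).mpr ?_
    intro a
    rw [List.mem_filter, mem_sorted_union, hmem]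
  · exact (pairwise_lt_sorted_union AK EK).filter c

theorem assert_rows_match_main : ∀ (section_name : String) (actual_rows : List (String × List (String × String))) (expected_rows : List (String × List (String × String))) (fields : List String), assert_rows_match section_name actual_rows expected_rows fields = assert_rows_match_alt section_name actual_rows expected_rows fields := by
  intro sec a e fields
  simp only [assert_rows_match, assert_rows_match_alt,
    PySem.List.foldl_append_ite, PySem.List.foldl_append_singleton_eq_map,
    PySem.List.foldl_append_eq_flatMap, tripleFold, List.nil_append]
  rw [sorted_eq_filter_sorted_union (a.map (·.1)) (e.map (·.1)) _
        (PySem.Set.diff (PySem.Set.ofList (e.map (·.1))) (PySem.Set.ofList (a.map (·.1))))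
        (PySem.Set.nodup_diff _ _ (PySem.Set.nodup_ofList _)) ?hm,
      sorted_eq_filter_sorted_union (a.map (·.1)) (e.map (·.1)) _
        (PySem.Set.diff (PySem.Set.ofList (a.map (·.1))) (PySem.Set.ofList (e.map (·.1))))
        (PySem.Set.nodup_diff _ _ (PySem.Set.nodup_ofList _)) ?he,
      sorted_eq_filter_sorted_union (a.map (·.1)) (e.map (·.1)) _
        (PySem.Set.inter (PySem.Set.ofList (a.map (·.1))) (PySem.Set.ofList (e.map (·.1))))
        (PySem.Set.nodup_inter _ _ (PySem.Set.nodup_ofList _)) ?hc]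
  case hm => intro x; simp [PySem.Set.mem_diff, PySem.Set.mem_ofList]; tauto
  case he => intro x; simp [PySem.Set.mem_diff, PySem.Set.mem_ofList]; tauto
  case hc => intro x; simp [PySem.Set.mem_inter, PySem.Set.mem_ofList]; tauto

-- ===== VERDICT (by name: the statement is the Claim_ definition above) =====
theorem assert_rows_match_spec : Claim_equal_assert_rows_match := by
  intro sec a e f _ _
  exact assert_rows_match_main sec a e f
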